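-- pv_equiv track=rewrite | github.com/daniel-reich/ubiquitous-fiesta | srEFhCNueikMKs3oT_9.py | consecutive_sum
-- ===== SOURCE A (Python) =====
-- def consecutive_sum(n):
--   if n < 3: return False
--   if n%2: return True
--   for i in range(1, n//2 + 1):
--     s, j = i, i + 1
--     while s < n:
--       s += j
--       if s == n:
--         return True
--       j += 1
--   return False
-- ===== SOURCE B (Python) =====
-- def consecutive_sum(n):
--     # n is a sum of >=2 consecutive positive integers iff n >= 3 and n is not a power of two:
--     # strip all factors of 2; what remains exceeds 1 exactly when n has an odd divisor > 1.
--     if n < 3: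
--         return False
--     m = n
--     while m % 2 == 0:
--         m //= 2
--     return m > 1
-- ===== Notes on version B (the rewrite author's own statement) =====
-- stated objective: faster
-- what changed: Replaced the nested start-point/partial-sum search with the classical characterisation: strip factors of 2 and test whether an odd divisor > 1 remains (n is a sum of consecutive positive integers iff n >= 3 and n is not a power of two).
import Mathlib
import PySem

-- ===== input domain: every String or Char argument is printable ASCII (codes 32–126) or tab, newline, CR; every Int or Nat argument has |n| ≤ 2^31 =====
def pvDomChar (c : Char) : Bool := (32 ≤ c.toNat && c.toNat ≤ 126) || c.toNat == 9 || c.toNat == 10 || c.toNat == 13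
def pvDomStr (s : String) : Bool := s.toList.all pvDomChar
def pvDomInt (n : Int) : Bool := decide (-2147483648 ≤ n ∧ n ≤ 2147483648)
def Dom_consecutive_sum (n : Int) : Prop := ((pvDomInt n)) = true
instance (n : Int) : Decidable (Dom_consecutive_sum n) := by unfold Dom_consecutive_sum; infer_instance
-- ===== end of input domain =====

-- B replaces A's quadratic start-point/partial-sum search by stripping factors of 2 and
-- testing for an odd divisor > 1 (n is such a sum iff n ≥ 3 and n is not a power of two).

-- ===== PORT A =====
-- inner `while s < n: s += j; if s == n: return True; j += 1` loop of A
-- (the `0 < j` conjunct is a totality guard only: every call has j ≥ 2)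
def innerA (n s j : Int) : Bool :=
  if _h : s < n ∧ 0 < j then
    if s + j = n then true
    else innerA n (s + j) (j + 1)
  else false
termination_by (n - s).toNat
decreasing_by omega

def consecutive_sum (n : Int) : Bool :=
  if n < 3 then false
  else if PySem.Int.mod n 2 ≠ 0 then true
  else (PySem.List.pyRange 1 (PySem.Int.floordiv n 2 + 1) 1).any (fun i => innerA n i (i + 1))

-- ===== PORT B =====
-- `while m % 2 == 0: m //= 2` of B (the `0 < m` conjunct is a totality guard only: called with m ≥ 3)
def stripTwos (m : Int) : Int :=
  if _h : PySem.Int.mod m 2 = 0 ∧ 0 < m then stripTwos (PySem.Int.floordiv m 2)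
  else m
termination_by m.toNat
decreasing_by
  rw [PySem.Int.floordiv_eq_ediv_of_pos (by norm_num)]
  omega

def consecutive_sum_alt (n : Int) : Bool :=
  if n < 3 then false
  else decide (1 < stripTwos n)

-- ===== PRECONDITION & SPEC =====
def Spec_consecutive_sum (n : Int) (out : Bool) : Prop := out = consecutive_sum_alt n
instance (n : Int) (out : Bool) : Decidable (Spec_consecutive_sum n out) := by unfold Spec_consecutive_sum; infer_instance

-- ===== CLAIM (what is proved, stated in full; the proofs are below) =====
def Claim_equal_consecutive_sum : Prop := ∀ (n : Int), Dom_consecutive_sum n → Spec_consecutive_sum n (consecutive_sum n)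

-- ===== LEMMAS AND PROOFS =====

-- sum j + (j+1) + ... + (j+m-1) (what A's inner loop adds onto s after m iterations)
def addSum (j : Int) : Nat → Int
  | 0 => 0
  | m + 1 => j + addSum (j + 1) m

theorem addSum_pos : ∀ (m : Nat) (j : Int), 1 ≤ j → 1 ≤ m → 1 ≤ addSum j m := by
  intro m
  induction m with
  | zero => omega
  | succ m ih =>
    intro j hj _
    simp only [addSum]
    rcases Nat.eq_zero_or_pos m with hm | hm
    · subst hm; simp [addSum]; omega
    · have := ih (j + 1) (by omega) hm
      omega

theorem two_mul_addSum : ∀ (m : Nat) (j : Int),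
    2 * addSum j m = (m : Int) * (2 * j + (m : Int) - 1) := by
  intro m
  induction m with
  | zero => simp [addSum]
  | succ m ih =>
    intro j
    have h := ih (j + 1)
    simp only [addSum]
    push_cast
    push_cast at h
    ring_nf
    ring_nf at h
    linarith

theorem inner_iff : ∀ (n s j : Int), 0 < j →
    (innerA n s j = true ↔ ∃ m : Nat, 1 ≤ m ∧ s + addSum j m = n) := by
  intro n s j
  induction s, j using innerA.induct n with
  | case1 s j h heq =>
    intro _
    rw [innerA]
    simp only [dif_pos h, if_pos heq]
    constructor
    · intro _
      exact ⟨1, le_refl 1, by simp [addSum]; omega⟩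
    · intro _; trivial
  | case2 s j h hne ih =>
    intro _
    rw [innerA]
    simp only [dif_pos h, if_neg hne]
    rw [ih (by omega)]
    constructor
    · rintro ⟨m, hm, he⟩
      refine ⟨m + 1, by omega, ?_⟩
      simp only [addSum]
      omega
    · rintro ⟨m, hm, he⟩
      obtain ⟨m', rfl⟩ : ∃ m', m = m' + 1 := ⟨m - 1, by omega⟩
      simp only [addSum] at he
      rcases Nat.eq_zero_or_pos m' with hm' | hm'
      · subst hm'; simp [addSum] at he; omega
      · exact ⟨m', hm', by omega⟩
  | case3 s j h =>
    intro hj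
    rw [innerA]
    simp only [dif_neg h]
    have hns : n ≤ s := by
      by_contra hc
      exact h ⟨by omega, hj⟩
    simp only [Bool.false_eq_true, false_iff]
    rintro ⟨m, hm, he⟩
    have := addSum_pos m j (by omega) hm
    omega

-- characterisation of A's even-branch search
theorem A_search_iff (n : Int) (h3 : 3 ≤ n) :
    ((PySem.List.pyRange 1 (PySem.Int.floordiv n 2 + 1) 1).any
        (fun i => innerA n i (i + 1)) = true)
      ↔ ∃ (a : Int) (k : Nat), 1 ≤ a ∧ 2 ≤ k ∧ addSum a k = n := by
  rw [List.any_eq_true]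
  constructor
  · rintro ⟨i, hi, hinner⟩
    rw [PySem.List.mem_pyRange_one] at hi
    obtain ⟨m, hm, he⟩ := (inner_iff n i (i + 1) (by omega)).mp hinner
    refine ⟨i, m + 1, hi.1, by omega, ?_⟩
    simp only [addSum]
    omega
  · rintro ⟨a, k, ha, hk, he⟩
    have h2 := two_mul_addSum k a
    rw [he] at h2
    have hbound : 2 * a + 1 ≤ n := by nlinarith
    refine ⟨a, ?_, ?_⟩
    · rw [PySem.List.mem_pyRange_one,
        PySem.Int.floordiv_eq_ediv_of_pos (by norm_num : (0:Int) < 2)]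
      omega
    · apply (inner_iff n a (a + 1) (by omega)).mpr
      obtain ⟨m, rfl⟩ : ∃ m, k = m + 1 := ⟨k - 1, by omega⟩
      refine ⟨m, by omega, ?_⟩
      simp only [addSum] at he
      omega

-- stripTwos computes the odd part
theorem strip_spec : ∀ (m : Int), 0 < m →
    ∃ t : Nat, m = 2 ^ t * stripTwos m ∧ stripTwos m % 2 = 1 ∧ 1 ≤ stripTwos m := by
  intro m
  induction m using stripTwos.induct with
  | case1 m h ih =>
    intro _
    have hmod : m % 2 = 0 := by
      rw [← PySem.Int.mod_eq_emod_of_pos (by norm_num : (0:Int) < 2)]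
      exact h.1
    have hfd : PySem.Int.floordiv m 2 = m / 2 :=
      PySem.Int.floordiv_eq_ediv_of_pos (by norm_num)
    have hpos : 0 < PySem.Int.floordiv m 2 := by rw [hfd]; omega
    obtain ⟨t, he, ho, h1⟩ := ih hpos
    have hs : stripTwos m = stripTwos (PySem.Int.floordiv m 2) := by
      rw [stripTwos, dif_pos h]
    refine ⟨t + 1, ?_, by rw [hs]; exact ho, by rw [hs]; exact h1⟩
    rw [hs, hfd, pow_succ]
    rw [hfd] at he
    have hm2 : m = 2 * (m / 2) := by omega
    linear_combination hm2 + 2 * he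
  | case2 m h =>
    intro hm
    have hs : stripTwos m = m := by rw [stripTwos, dif_neg h]
    have hodd : m % 2 = 1 := by
      rcases Int.emod_two_eq m with h0 | h1
      · exfalso
        exact h ⟨by rw [PySem.Int.mod_eq_emod_of_pos (by norm_num : (0:Int) < 2)]; exact h0, hm⟩
      · exact h1
    exact ⟨0, by rw [hs]; ring, by rw [hs]; exact hodd, by rw [hs]; omega⟩

-- an odd positive divisor of a power of two is 1
theorem odd_dvd_two_pow (d : Int) (t : Nat) (hd : 1 ≤ d) (ho : d % 2 = 1)
    (hdvd : d ∣ (2 : Int) ^ t) : d = 1 := by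
  have h1 : d.toNat ∣ 2 ^ t := by
    have : ((d.toNat : Int)) ∣ ((2 ^ t : Nat) : Int) := by
      push_cast
      rwa [Int.toNat_of_nonneg (by omega)]
    exact_mod_cast this
  have hcop : Nat.Coprime d.toNat 2 :=
    Nat.coprime_two_right.mpr (Nat.odd_iff.mpr (by omega))
  have := (hcop.pow_right t).eq_one_of_dvd h1
  omega

-- the search succeeds iff the odd part exceeds 1
theorem rep_iff_strip (n : Int) (h3 : 3 ≤ n) :
    (∃ (a : Int) (k : Nat), 1 ≤ a ∧ 2 ≤ k ∧ addSum a k = n) ↔ 1 < stripTwos n := by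
  obtain ⟨t, hn, hodd, h1⟩ := strip_spec n (by omega)
  constructor
  · rintro ⟨a, k, ha, hk, he⟩
    by_contra hc
    have hq1 : stripTwos n = 1 := by omega
    rw [hq1, mul_one] at hn
    have h2 : (k : Int) * (2 * a + (k : Int) - 1) = 2 * n := by
      have := two_mul_addSum k a
      rw [he] at this; linarith
    rw [hn, ← pow_succ'] at h2
    have hK2 : (2 : Int) ≤ (k : Int) := by exact_mod_cast hk
    have hM3 : (3 : Int) ≤ 2 * a + (k : Int) - 1 := by omega
    rcases Int.emod_two_eq (k : Int) with hKo | hKo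
    · -- k even, the other factor odd
      have hMo : (2 * a + (k : Int) - 1) % 2 = 1 := by omega
      have := odd_dvd_two_pow (2 * a + (k : Int) - 1) (t + 1) (by omega) hMo
        ⟨(k : Int), by linear_combination - h2⟩
      omega
    · -- k odd
      have := odd_dvd_two_pow (k : Int) (t + 1) (by omega) hKo
        ⟨2 * a + (k : Int) - 1, by linear_combination - h2⟩
      omega
  · intro hq
    set q : Int := stripTwos n with hqdef
    set T : Int := 2 ^ t with hT
    have hT1 : 1 ≤ T := by rw [hT]; exact one_le_pow₀ (by norm_num)
    have hq3 : 3 ≤ q := by omega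
    obtain ⟨r, hr⟩ : ∃ r, q = 2 * r + 1 := ⟨q / 2, by omega⟩
    by_cases hlt : q < 2 * T
    · -- k = q, a = T - r
      refine ⟨T - r, q.toNat, by omega, by omega, ?_⟩
      have hcast : ((q.toNat : Int)) = q := Int.toNat_of_nonneg (by omega)
      have h2 := two_mul_addSum q.toNat (T - r)
      rw [hcast] at h2
      have : 2 * addSum (T - r) q.toNat = 2 * n := by
        rw [h2, hn, hr]; ring
      omega
    · -- q > 2T (q ≠ 2T by parity); k = 2T, a = r + 1 - T
      have hgt : 2 * T + 1 ≤ q := by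
        rcases lt_or_eq_of_le (not_lt.mp hlt) with h | h
        · omega
        · exfalso; omega
      refine ⟨r + 1 - T, (2 * T).toNat, by omega, by omega, ?_⟩
      have hcast : (((2 * T).toNat : Int)) = 2 * T := Int.toNat_of_nonneg (by omega)
      have h2 := two_mul_addSum (2 * T).toNat (r + 1 - T)
      rw [hcast] at h2
      have : 2 * addSum (r + 1 - T) (2 * T).toNat = 2 * n := by
        rw [h2, hn, hr]; ring
      omega

-- ===== VERDICT (by name: the statement is the Claim_ definition above) =====
theorem consecutive_sum_spec : Claim_equal_consecutive_sum := by
  unfold Claim_equal_consecutive_sum Spec_consecutive_sum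
  intro n _
  by_cases h3 : n < 3
  · simp [consecutive_sum, consecutive_sum_alt, h3]
  · rw [not_lt] at h3
    have hmod : PySem.Int.mod n 2 = n % 2 :=
      PySem.Int.mod_eq_emod_of_pos (by norm_num)
    rcases Int.emod_two_eq n with heven | hodd
    · -- even branch: both reduce to the characterisations
      have hmz : ¬ (PySem.Int.mod n 2 ≠ 0) := by rw [hmod, heven]; simp
      rw [consecutive_sum, if_neg (not_lt.mpr h3), if_neg hmz,
        consecutive_sum_alt, if_neg (not_lt.mpr h3)]
      rw [Bool.eq_iff_iff, A_search_iff n h3, rep_iff_strip n h3, decide_eq_true_iff]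
    · -- odd branch: A returns True; stripTwos leaves n unchanged, n > 1
      have hmz : PySem.Int.mod n 2 ≠ 0 := by rw [hmod, hodd]; norm_num
      rw [consecutive_sum, if_neg (not_lt.mpr h3), if_pos hmz,
        consecutive_sum_alt, if_neg (not_lt.mpr h3)]
      have hs : stripTwos n = n := by
        rw [stripTwos, dif_neg]
        rintro ⟨h0, _⟩
        exact hmz h0
      rw [hs, eq_comm, decide_eq_true_iff]
      omega
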